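-- pv_equiv track=rewrite | github.com/corentintriboulet/CS-CourseWork | Algorithms and Data structures/Tutorial 1/TD1 Algorithme et structure.py | nb_facon_3de
-- ===== SOURCE A (Python) =====
-- def nb_facon_3de(n):
--     l=[]
--     for i in range(1,7):
--         for j in range(1,7):
--             for k in range(1,7):
--                 if i+j+k==n:
--                     l.append([i,j,k])
--     return len(l),l
-- ===== SOURCE B (Python) =====
-- def nb_facon_3de(n):
--     l = []
--     for i in range(1, 7):
--         lo = max(1, n - i - 6)
--         hi = min(6, n - i - 1)
--         for j in range(lo, hi + 1):
--             l.append([i, j, n - i - j])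
--     return len(l), l
-- ===== Notes on version B (the rewrite author's own statement) =====
-- stated objective: alternative
-- what changed: Instead of enumerating and testing every (j,k) pair per first die i, B computes the exact interval [max(1,n-i-6), min(6,n-i-1)] of valid second dice and emits [i,j,n-i-j] directly, with no membership test at all.
import Mathlib
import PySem

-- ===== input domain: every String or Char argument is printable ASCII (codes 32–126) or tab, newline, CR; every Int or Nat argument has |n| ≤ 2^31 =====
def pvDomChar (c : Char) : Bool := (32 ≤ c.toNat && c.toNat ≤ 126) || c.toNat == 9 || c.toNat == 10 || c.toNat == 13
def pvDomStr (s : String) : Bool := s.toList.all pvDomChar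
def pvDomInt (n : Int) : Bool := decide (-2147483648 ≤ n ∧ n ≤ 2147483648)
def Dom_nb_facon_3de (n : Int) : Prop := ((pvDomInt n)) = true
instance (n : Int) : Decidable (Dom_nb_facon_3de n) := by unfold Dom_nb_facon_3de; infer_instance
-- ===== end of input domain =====

-- B replaces A's enumerate-and-test over all (j,k) pairs by computing, per first die i, the exact interval of valid second dice and emitting each triple directly; same output, no tests.


-- ===== PORT A =====
def nb_facon_3de (n : Int) : Int × List (List Int) :=
  let l := (PySem.List.pyRange 1 7 1).foldl (fun l i =>
    (PySem.List.pyRange 1 7 1).foldl (fun l j =>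
      (PySem.List.pyRange 1 7 1).foldl (fun l k =>
        if i + j + k = n then l ++ [[i, j, k]] else l) l) l) []
  ((l.length : Int), l)

-- ===== PORT B =====
def nb_facon_3de_alt (n : Int) : Int × List (List Int) :=
  let l := (PySem.List.pyRange 1 7 1).foldl (fun l i =>
    let lo := max 1 (n - i - 6)
    let hi := min 6 (n - i - 1)
    (PySem.List.pyRange lo (hi + 1) 1).foldl (fun l j =>
      l ++ [[i, j, n - i - j]]) l) []
  ((l.length : Int), l)

-- ===== PRECONDITION & SPEC =====
def Spec_nb_facon_3de (n : Int) (out : Int × List (List Int)) : Prop := out = nb_facon_3de_alt n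
instance (n : Int) (out : Int × List (List Int)) : Decidable (Spec_nb_facon_3de n out) := by unfold Spec_nb_facon_3de; infer_instance

-- ===== CLAIM (what is proved, stated in full; the proofs are below) =====
def Claim_equal_nb_facon_3de : Prop := ∀ (n : Int), Dom_nb_facon_3de n → Spec_nb_facon_3de n (nb_facon_3de n)

-- ===== LEMMAS AND PROOFS =====

-- A's inner loop over k appends at most one triple: exactly k = n - i - j when it is a valid face.
theorem inner_k_loop (n i j : Int) (l : List (List Int)) :
    (PySem.List.pyRange 1 7 1).foldl (fun l k =>
        if i + j + k = n then l ++ [[i, j, k]] else l) l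
    = (if 1 ≤ n - i - j ∧ n - i - j ≤ 6 then l ++ [[i, j, n - i - j]] else l) := by
  have hr : PySem.List.pyRange 1 7 1 = [1, 2, 3, 4, 5, 6] := by decide
  simp only [hr, List.foldl]
  split_ifs <;> first
    | rfl
    | omega
    | (simp only [List.append_right_inj, List.cons.injEq, and_true, true_and]; omega)

-- The second dice that pass A's test over 1..6 are exactly B's computed interval.
theorem filter_eq_range (m : Int) :
    (PySem.List.pyRange 1 7 1).filter (fun j => decide (1 ≤ m - j ∧ m - j ≤ 6))
    = PySem.List.pyRange (max 1 (m - 6)) (min 6 (m - 1) + 1) 1 := by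
  by_cases h : 2 ≤ m ∧ m ≤ 12
  · obtain ⟨h1, h2⟩ := h
    interval_cases m <;> decide
  · rw [List.filter_eq_nil_iff.mpr, PySem.List.pyRange_one_eq_nil (by omega)]
    intro x hx
    have := PySem.List.mem_pyRange_one.mp hx
    simp only [decide_eq_true_eq]
    omega

theorem nb_facon_3de_spec : Claim_equal_nb_facon_3de := by
  intro n _
  unfold Spec_nb_facon_3de nb_facon_3de nb_facon_3de_alt
  have h : ∀ (l : List (List Int)) (i : Int),
      (PySem.List.pyRange 1 7 1).foldl (fun l j =>
        (PySem.List.pyRange 1 7 1).foldl (fun l k =>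
          if i + j + k = n then l ++ [[i, j, k]] else l) l) l
      = (PySem.List.pyRange (max 1 (n - i - 6)) (min 6 (n - i - 1) + 1) 1).foldl
          (fun l j => l ++ [[i, j, n - i - j]]) l := by
    intro l i
    calc (PySem.List.pyRange 1 7 1).foldl (fun l j =>
            (PySem.List.pyRange 1 7 1).foldl (fun l k =>
              if i + j + k = n then l ++ [[i, j, k]] else l) l) l
        = (PySem.List.pyRange 1 7 1).foldl (fun l j =>
            if 1 ≤ n - i - j ∧ n - i - j ≤ 6 then l ++ [[i, j, n - i - j]] else l) l := by
          apply List.foldl_ext; intro acc j _; exact inner_k_loop n i j acc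
      _ = l ++ ((PySem.List.pyRange 1 7 1).filter
              (fun j => decide (1 ≤ n - i - j ∧ n - i - j ≤ 6))).map (fun j => [i, j, n - i - j]) := by
          exact PySem.List.foldl_append_ite (fun j => 1 ≤ n - i - j ∧ n - i - j ≤ 6) (fun j => [i, j, n - i - j]) _ l
      _ = l ++ (PySem.List.pyRange (max 1 (n - i - 6)) (min 6 (n - i - 1) + 1) 1).map
              (fun j => [i, j, n - i - j]) := by rw [filter_eq_range (n - i)]
      _ = (PySem.List.pyRange (max 1 (n - i - 6)) (min 6 (n - i - 1) + 1) 1).foldl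
            (fun l j => l ++ [[i, j, n - i - j]]) l := by
          rw [PySem.List.foldl_append_singleton_eq_map]
  simp only [h]

-- ===== VERDICT (by name: the statement is the Claim_ definition above) =====
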